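-- pv_equiv track=rewrite | github.com/caitlinbeecham/Sorting-Algorithms-Java | ShellSort.py | SubArraysByIndexForH
-- ===== SOURCE A (Python) =====
-- def SubArraysByIndexForH(seq, H):
--     SubArraysByIndex = []
--     for i in range(H):
--         SubArrayByIndex = []
--         if i < len(seq):
--             SubArrayByIndex.append(i)
--         while i+H < len(seq):
--             i = i+H
--             SubArrayByIndex.append(i)
--         SubArraysByIndex.append(SubArrayByIndex)
--     return SubArraysByIndex
-- ===== SOURCE B (Python) =====
-- def SubArraysByIndexForH(seq, H):
--     if H <= 0:
--         return []
--     groups = [[] for _ in range(H)]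
--     for i in range(len(seq)):
--         groups[i % H].append(i)
--     return groups
-- ===== Notes on version B (the rewrite author's own statement) =====
-- stated objective: simpler
-- what changed: Replaces the outer residue-class loop with an inner stride while-loop by one flat pass over all indices that buckets each index i into groups[i % H].
import Mathlib
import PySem

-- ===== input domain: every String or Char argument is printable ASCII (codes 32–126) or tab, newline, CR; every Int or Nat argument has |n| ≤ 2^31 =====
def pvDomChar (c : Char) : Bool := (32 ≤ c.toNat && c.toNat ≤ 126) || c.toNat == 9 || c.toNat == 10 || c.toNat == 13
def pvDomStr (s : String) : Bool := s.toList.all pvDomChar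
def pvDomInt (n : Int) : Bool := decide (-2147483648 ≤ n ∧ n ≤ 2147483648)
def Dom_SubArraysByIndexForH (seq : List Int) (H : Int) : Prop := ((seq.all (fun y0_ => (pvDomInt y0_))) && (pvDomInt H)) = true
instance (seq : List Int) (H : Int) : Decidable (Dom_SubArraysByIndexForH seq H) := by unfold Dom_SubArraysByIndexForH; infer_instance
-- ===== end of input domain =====

-- B replaces A's outer residue-class loop with inner stride while-loop by one flat
-- pass over all indices, bucketing index i into groups[i % H] (objective: simpler).


-- ===== PORT A =====
-- the 'while i+H < len(seq): i = i+H; SubArrayByIndex.append(i)' loop; fuel bounds the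
-- iteration count (fuel = len(seq) suffices whenever the loop is reached, since H ≥ 1 there)
def pvLoopA : Nat → Int → Int → Int → List Int → Int × List Int
  | 0, _, _, i, sub => (i, sub)
  | fuel+1, n, H, i, sub =>
      if i + H < n then pvLoopA fuel n H (i + H) (sub ++ [i + H]) else (i, sub)

def SubArraysByIndexForH (seq : List Int) (H : Int) : List (List Int) :=
  (PySem.List.pyRange 0 H 1).foldl
    (fun acc i =>
      let sub : List Int := if i < (seq.length : Int) then [i] else []
      acc ++ [(pvLoopA seq.length (seq.length : Int) H i sub).2])
    []

-- ===== PORT B =====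
def SubArraysByIndexForH_alt (seq : List Int) (H : Int) : List (List Int) :=
  if H ≤ 0 then []
  else
    (PySem.List.pyRange 0 (seq.length : Int) 1).foldl
      (fun gs i => gs.modify (PySem.Int.mod i H).toNat (fun g => g ++ [i]))
      (List.replicate H.toNat [])

-- ===== PRECONDITION & SPEC =====
def Spec_SubArraysByIndexForH (seq : List Int) (H : Int) (out : List (List Int)) : Prop := out = SubArraysByIndexForH_alt seq H
instance (seq : List Int) (H : Int) (out : List (List Int)) : Decidable (Spec_SubArraysByIndexForH seq H out) := by unfold Spec_SubArraysByIndexForH; infer_instance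

-- ===== CLAIM (what is proved, stated in full; the proofs are below) =====
def Claim_equal_SubArraysByIndexForH : Prop := ∀ (seq : List Int) (H : Int), Dom_SubArraysByIndexForH seq H → Spec_SubArraysByIndexForH seq H (SubArraysByIndexForH seq H)

-- ===== LEMMAS AND PROOFS =====

-- pyRange with a positive step: nil, cons and snoc forms
theorem pvRange_pos_nil (a b s : Int) (hs : 0 < s) (hba : b ≤ a) :
    PySem.List.pyRange a b s = [] := by
  rw [PySem.List.pyRange_of_pos a b hs, if_neg (by omega)]
  simp

theorem pvRange_pos_cons (a b s : Int) (hs : 0 < s) (hab : a < b) :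
    PySem.List.pyRange a b s = a :: PySem.List.pyRange (a + s) b s := by
  rw [PySem.List.pyRange_of_pos a b hs, PySem.List.pyRange_of_pos (a + s) b hs, if_pos hab]
  have hkey : ((b - a + s - 1) / s).toNat
      = (if a + s < b then ((b - (a + s) + s - 1) / s).toNat else 0) + 1 := by
    by_cases h2 : a + s < b
    · rw [if_pos h2]
      have : b - a + s - 1 = (b - (a + s) + s - 1) + 1 * s := by ring
      rw [this, Int.add_mul_ediv_right _ _ (by omega)]
      have hnn : 0 ≤ (b - (a + s) + s - 1) / s := Int.ediv_nonneg (by omega) (by omega)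
      omega
    · rw [if_neg h2]
      have h1 : (b - a + s - 1) / s = 1 := by
        rw [← PySem.Int.floordiv_eq_ediv_of_pos hs,
            PySem.Int.floordiv_eq_iff_of_pos hs]
        constructor <;> nlinarith
      rw [h1]; rfl
  rw [hkey, List.range_succ_eq_map]
  simp only [List.map_cons, List.map_map]
  congr 1
  · push_cast; ring
  · apply List.map_congr_left
    intro k _
    simp only [Function.comp_apply]
    push_cast [Nat.succ_eq_add_one]
    ring

theorem pvRange_pos_snoc (s : Int) (hs : 0 < s) :
    ∀ (m : Nat) (a b : Int), b - a = (m : Int) →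
      PySem.List.pyRange a (b + 1) s
        = PySem.List.pyRange a b s ++ (if s ∣ b - a then [b] else []) := by
  intro m
  induction m using Nat.strong_induction_on with
  | _ m ih =>
    intro a b hm
    have hab : a ≤ b := by omega
    rcases lt_or_eq_of_le hab with hlt | heq
    · rw [pvRange_pos_cons a (b + 1) s hs (by omega), pvRange_pos_cons a b s hs hlt]
      by_cases h2 : a + s ≤ b
      · have hmeas : (b - (a + s)).toNat < m := by omega
        have := ih (b - (a + s)).toNat hmeas (a + s) b (by omega)
        rw [this]
        have hdvd : (s ∣ b - (a + s)) ↔ (s ∣ b - a) := by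
          constructor
          · intro ⟨c, hc⟩; exact ⟨c + 1, by rw [mul_add, mul_one]; omega⟩
          · intro ⟨c, hc⟩; exact ⟨c - 1, by rw [mul_sub, mul_one]; omega⟩
        simp [hdvd]
      · rw [pvRange_pos_nil (a + s) (b + 1) s hs (by omega),
            pvRange_pos_nil (a + s) b s hs (by omega)]
        have : ¬ s ∣ b - a := by
          intro hd
          have := Int.le_of_dvd (by omega) hd
          omega
        simp [this]
    · subst heq
      rw [pvRange_pos_cons a (a + 1) s hs (by omega),
          pvRange_pos_nil (a + s) (a + 1) s hs (by omega),
          pvRange_pos_nil a a s hs (by omega)]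
      simp

-- the while-loop of A produces exactly the stride list range(i+H, n, H)
theorem pvLoopA_eq : ∀ (fuel : Nat) (n H i : Int) (sub : List Int), 0 < H →
    n ≤ i + H * (fuel : Int) →
    (pvLoopA fuel n H i sub).2 = sub ++ PySem.List.pyRange (i + H) n H := by
  intro fuel
  induction fuel with
  | zero =>
    intro n H i sub hH hle
    simp only [pvLoopA]
    rw [pvRange_pos_nil (i + H) n H hH (by push_cast at hle; omega)]
    simp
  | succ fuel ih =>
    intro n H i sub hH hle
    simp only [pvLoopA]
    by_cases hcond : i + H < n
    · rw [if_pos hcond, ih n H (i + H) (sub ++ [i + H]) hH (by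
          push_cast at hle ⊢
          have hd : H * ((fuel : Int) + 1) = H * (fuel : Int) + H := by ring
          omega),
          pvRange_pos_cons (i + H) n H hH hcond]
      simp
    · rw [if_neg hcond, pvRange_pos_nil (i + H) n H hH (by omega)]
      simp

-- folding 'acc ++ [f i]' is mapping
theorem pvFoldl_append_map (f : Int → List Int) :
    ∀ (l : List Int) (acc : List (List Int)),
      l.foldl (fun a i => a ++ [f i]) acc = acc ++ l.map f := by
  intro l
  induction l with
  | nil => simp
  | cons x xs ih => intro acc; simp [List.foldl_cons, ih]

-- A equals the common closed form: one bucket range(r, n, H) per residue r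
theorem pvA_eq (seq : List Int) (H : Int) (hH : 0 < H) :
    SubArraysByIndexForH seq H
      = (PySem.List.pyRange 0 H 1).map
          (fun r => PySem.List.pyRange r (seq.length : Int) H) := by
  unfold SubArraysByIndexForH
  rw [pvFoldl_append_map
      (fun i => (pvLoopA seq.length (seq.length : Int) H i
        (if i < (seq.length : Int) then [i] else [])).2)]
  rw [List.nil_append]
  apply List.map_congr_left
  intro i hi
  rw [PySem.List.mem_pyRange_one] at hi
  rw [pvLoopA_eq seq.length (seq.length : Int) H i _ hH
      (by nlinarith [hi.1, hi.2, (Int.natCast_nonneg seq.length)])]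
  by_cases hin : i < (seq.length : Int)
  · rw [if_pos hin, pvRange_pos_cons i (seq.length : Int) H hH hin]
    rfl
  · rw [if_neg hin, pvRange_pos_nil (i + H) (seq.length : Int) H hH (by omega),
        pvRange_pos_nil i (seq.length : Int) H hH (by omega)]
    simp

-- B equals the same closed form, by induction on len(seq)
theorem pvB_eq_aux (H : Int) (hH : 0 < H) :
    ∀ (n : Nat),
      (PySem.List.pyRange 0 (n : Int) 1).foldl
          (fun gs i => gs.modify (PySem.Int.mod i H).toNat (fun g => g ++ [i]))
          (List.replicate H.toNat [])
        = (PySem.List.pyRange 0 H 1).map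
            (fun r => PySem.List.pyRange r (n : Int) H) := by
  intro n
  induction n with
  | zero =>
    push_cast
    rw [PySem.List.pyRange_one_eq_nil (by norm_num)]
    rw [List.foldl_nil]
    have : ∀ r ∈ PySem.List.pyRange 0 H 1,
        PySem.List.pyRange r (0 : Int) H = ([] : List Int) := by
      intro r hr
      rw [PySem.List.mem_pyRange_one] at hr
      exact pvRange_pos_nil r 0 H hH hr.1
    rw [List.map_congr_left this]
    simp [List.map_const', PySem.List.length_pyRange_one]
  | succ n ih =>
    have hcast : ((n + 1 : Nat) : Int) = (n : Int) + 1 := by push_cast; ring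
    rw [hcast, PySem.List.pyRange_one_succ_right (by positivity),
        List.foldl_append, ih, List.foldl_cons, List.foldl_nil]
    apply List.ext_getElem
    · simp
    · intro k hk1 hk2
      have hklen : k < H.toNat := by
        simpa [PySem.List.length_pyRange_one] using hk2
      have hkH : (k : Int) < H := by omega
      have hgetr : (PySem.List.pyRange 0 H 1)[k]'(by
          rw [PySem.List.length_pyRange_one]; omega) = (k : Int) := by
        rw [PySem.List.getElem_pyRange_one]; ring
      have hmod : PySem.Int.mod (n : Int) H = (n : Int) % H := by
        rw [PySem.Int.mod_eq_emod_of_pos hH]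
      rw [List.getElem_modify]
      rw [List.getElem_map, List.getElem_map, hgetr]
      have hmodnn : 0 ≤ (n : Int) % H := Int.emod_nonneg _ (by omega)
      by_cases hcase : (n : Int) < (k : Int)
      · -- residue k exceeds n: both buckets empty, and the modified index is not k
        have hne : (PySem.Int.mod (n : Int) H).toNat ≠ k := by
          rw [hmod]
          have : (n : Int) % H = (n : Int) := Int.emod_eq_of_lt (by positivity) (by omega)
          omega
        rw [if_neg hne,
            pvRange_pos_nil (k : Int) ((n : Int) + 1) H hH (by omega),
            pvRange_pos_nil (k : Int) (n : Int) H hH (by omega)]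
      · have hsnoc := pvRange_pos_snoc H hH ((n : Int) - (k : Int)).toNat
          (k : Int) (n : Int) (by omega)
        rw [hsnoc]
        by_cases hd : H ∣ (n : Int) - (k : Int)
        · have heqidx : (PySem.Int.mod (n : Int) H).toNat = k := by
            rw [hmod]
            have : (n : Int) % H = (k : Int) % H :=
              (Int.emod_eq_emod_iff_emod_sub_eq_zero).mpr
                (Int.emod_eq_zero_of_dvd hd)
            have hk' : (k : Int) % H = (k : Int) :=
              Int.emod_eq_of_lt (by positivity) hkH
            omega
          rw [if_pos heqidx, if_pos hd]
        · have hneidx : (PySem.Int.mod (n : Int) H).toNat ≠ k := by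
            rw [hmod]
            intro hc
            apply hd
            have hkeq : (n : Int) % H = (k : Int) := by omega
            refine ⟨(n : Int) / H, ?_⟩
            have hq : (n : Int) % H + H * ((n : Int) / H) = (n : Int) :=
              Int.emod_add_mul_ediv _ _
            linarith
          rw [if_neg hneidx, if_neg hd, List.append_nil]

theorem pvB_eq (seq : List Int) (H : Int) (hH : 0 < H) :
    SubArraysByIndexForH_alt seq H
      = (PySem.List.pyRange 0 H 1).map
          (fun r => PySem.List.pyRange r (seq.length : Int) H) := by
  unfold SubArraysByIndexForH_alt
  rw [if_neg (by omega)]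
  exact pvB_eq_aux H hH seq.length

-- ===== VERDICT (by name: the statement is the Claim_ definition above) =====
theorem SubArraysByIndexForH_spec : Claim_equal_SubArraysByIndexForH := by
  intro seq H _
  unfold Spec_SubArraysByIndexForH
  by_cases hH : 0 < H
  · rw [pvA_eq seq H hH, pvB_eq seq H hH]
  · unfold SubArraysByIndexForH SubArraysByIndexForH_alt
    rw [PySem.List.pyRange_one_eq_nil (by omega), if_pos (by omega)]
    rfl
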